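-- pv_equiv track=rewrite | github.com/yekerr/PSense | psense.py | parse_psi_output
-- ===== SOURCE A (Python) =====
-- def parse_psi_output(output):
--     result = ""
--     for valid_output in output.split("\n"):
--         if valid_output:
--             if valid_output[0] == "p":
--                 result = valid_output.strip()
--                 break;
--     else:
--         result = None
--     return result
-- ===== SOURCE B (Python) =====
-- def parse_psi_output(output):
--     # Single left-to-right character scan with an "at line start" flag:
--     # never builds the list of lines.
--     at_start = True
--     for i, c in enumerate(output):
--         if at_start and c == "p":
--             line = []
--             for ch in output[i:]:
--                 if ch == "\n":
--                     break
--                 line.append(ch)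
--             return "".join(line).strip()
--         at_start = (c == "\n")
--     return None
-- ===== Notes on version B (the rewrite author's own statement) =====
-- stated objective: alternative
-- what changed: B replaces A's split-into-a-list-of-lines-then-scan with a single character-level scan carrying an at-line-start flag, extracting the matching line in place; no list of lines is ever built.
import Mathlib
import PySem

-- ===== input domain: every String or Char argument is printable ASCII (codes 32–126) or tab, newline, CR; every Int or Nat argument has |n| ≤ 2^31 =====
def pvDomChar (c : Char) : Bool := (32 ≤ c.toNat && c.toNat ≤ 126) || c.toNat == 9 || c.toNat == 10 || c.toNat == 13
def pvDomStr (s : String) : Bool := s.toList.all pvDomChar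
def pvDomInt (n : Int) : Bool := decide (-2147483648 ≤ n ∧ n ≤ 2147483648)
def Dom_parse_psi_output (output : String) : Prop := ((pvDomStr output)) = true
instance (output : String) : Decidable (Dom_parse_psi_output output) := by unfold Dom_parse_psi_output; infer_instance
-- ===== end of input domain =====

-- B replaces A's split-into-lines-then-scan with one character-level scan carrying an
-- at-line-start flag (objective: alternative structure, same O(n) cost).

-- ===== PORT A =====
-- A: for valid_output in output.split("\n"): if valid_output: if valid_output[0] == "p":
--    result = valid_output.strip(); break  else: result = None  (for-else: None when no break)
def pvLoopA : List (List Char) → Option (List Char)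
  | [] => none        -- loop fell through: the for-else sets result = None
  | l :: ls =>
      if l ≠ [] then
        if PySem.List.pyGet? l 0 = some 'p' then some (PySem.Chars.strip l)
        else pvLoopA ls
      else pvLoopA ls

def parse_psi_output (output : String) : Option String :=
  (pvLoopA (PySem.Chars.splitOn output.toList ['\n'])).map String.ofList

-- ===== PORT B =====
-- collect the characters of the current line up to (not including) '\n'  (B's inner for/break)
def pvTakeLine : List Char → List Char
  | [] => []
  | c :: rest => if c = '\n' then [] else c :: pvTakeLine rest

-- B's outer scan: atStart is the Python at_start flag
def pvScanB : List Char → Bool → Option (List Char)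
  | [], _ => none
  | c :: rest, atStart =>
      if atStart && c = 'p' then some (PySem.Chars.strip (c :: pvTakeLine rest))
      else pvScanB rest (c = '\n')

def parse_psi_output_alt (output : String) : Option String :=
  (pvScanB output.toList true).map String.ofList

-- ===== PRECONDITION & SPEC =====
def Spec_parse_psi_output (output : String) (out : Option String) : Prop := out = parse_psi_output_alt output
instance (output : String) (out : Option String) : Decidable (Spec_parse_psi_output output out) := by unfold Spec_parse_psi_output; infer_instance

-- ===== CLAIM (what is proved, stated in full; the proofs are below) =====
def Claim_equal_parse_psi_output : Prop := ∀ (output : String), Dom_parse_psi_output output → Spec_parse_psi_output output (parse_psi_output output)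

-- ===== LEMMAS AND PROOFS =====

-- reference splitter on '\n', structurally recursive over the characters
def pvSplitNL : List Char → List (List Char)
  | [] => [[]]
  | c :: rest =>
      if c = '\n' then [] :: pvSplitNL rest
      else
        match pvSplitNL rest with
        | r :: rs => (c :: r) :: rs
        | [] => [[c]]

lemma pvSplitNL_ne_nil (cs : List Char) : pvSplitNL cs ≠ [] := by
  cases cs with
  | nil => simp [pvSplitNL]
  | cons c rest =>
      simp only [pvSplitNL]
      split_ifs with h
      · simp
      · cases pvSplitNL rest <;> simp

lemma pvSplitNL_head (cs : List Char) : (pvSplitNL cs).headI = pvTakeLine cs := by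
  induction cs with
  | nil => simp [pvSplitNL, pvTakeLine]
  | cons c rest ih =>
      simp only [pvSplitNL, pvTakeLine]
      split_ifs with h
      · simp
      · rcases hr : pvSplitNL rest with _ | ⟨r, rs⟩
        · exact absurd hr (pvSplitNL_ne_nil rest)
        · simp only [List.headI]
          rw [← ih, hr]
          simp [List.headI]

lemma pvSplitNL_tail (c : Char) (rest : List Char) (h : c ≠ '\n') :
    (pvSplitNL (c :: rest)).tail = (pvSplitNL rest).tail := by
  simp only [pvSplitNL, if_neg h]
  rcases hr : pvSplitNL rest with _ | ⟨r, rs⟩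
  · exact absurd hr (pvSplitNL_ne_nil rest)
  · simp

-- PySem.Chars.splitOn.go with single-char separator '\n' computes pvSplitNL
lemma pvSplitOn_go (cs : List Char) : ∀ (fuel : Nat) (cur : List Char) (acc : List (List Char)),
    cs.length < fuel →
    PySem.Chars.splitOn.go ['\n'] fuel cs cur acc =
      acc.reverse ++ ((cur.reverse ++ (pvSplitNL cs).headI) :: (pvSplitNL cs).tail) := by
  induction cs with
  | nil =>
      intro fuel cur acc hf
      match fuel with
      | fuel + 1 => simp [PySem.Chars.splitOn.go, pvSplitNL]
  | cons c rest ih =>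
      intro fuel cur acc hf
      match fuel with
      | fuel + 1 =>
        by_cases h : c = '\n'
        · subst h
          have hpre : List.isPrefixOf ['\n'] ('\n' :: rest) = true := by simp [List.isPrefixOf]
          simp only [PySem.Chars.splitOn.go, hpre, if_pos, List.length_singleton,
            List.drop_succ_cons, List.drop_zero]
          rw [ih fuel [] (cur.reverse :: acc) (by simpa using Nat.lt_of_succ_lt_succ hf)]
          rcases hr : pvSplitNL rest with _ | ⟨r, rs⟩
          · exact absurd hr (pvSplitNL_ne_nil rest)
          · simp [pvSplitNL, hr]
        · have hpre : List.isPrefixOf ['\n'] (c :: rest) = false := by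
            simp only [List.isPrefixOf, Bool.and_true, beq_eq_false_iff_ne, ne_eq]
            exact Ne.symm h
          simp only [PySem.Chars.splitOn.go, hpre]
          rw [if_neg (by simp),
            ih fuel (c :: cur) acc (by simpa using Nat.lt_of_succ_lt_succ hf)]
          have h1 : (pvSplitNL (c :: rest)).headI = c :: (pvSplitNL rest).headI := by
            rw [pvSplitNL_head, pvSplitNL_head]
            simp [pvTakeLine, h]
          rw [h1, pvSplitNL_tail c rest h]
          simp

lemma pvSplitOn_eq (cs : List Char) :
    PySem.Chars.splitOn cs ['\n'] = pvSplitNL cs := by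
  unfold PySem.Chars.splitOn
  rw [pvSplitOn_go cs (cs.length + 1) [] [] (Nat.lt_succ_self _)]
  rcases h : pvSplitNL cs with _ | ⟨r, rs⟩
  · exact absurd h (pvSplitNL_ne_nil cs)
  · simp

-- the core equivalence: B's flagged scan equals A's loop over the split lines
lemma pvScan_eq (cs : List Char) :
    pvScanB cs true = pvLoopA (pvSplitNL cs) ∧
    pvScanB cs false = pvLoopA ((pvSplitNL cs).tail) := by
  induction cs with
  | nil => simp [pvScanB, pvSplitNL, pvLoopA]
  | cons c rest ih =>
      by_cases h : c = '\n'
      · subst h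
        have e1 : pvScanB ('\n' :: rest) true = pvScanB rest true := by
          simp [pvScanB]
        have e2 : pvScanB ('\n' :: rest) false = pvScanB rest true := by
          simp [pvScanB]
        have e3 : pvSplitNL ('\n' :: rest) = [] :: pvSplitNL rest := by
          simp [pvSplitNL]
        rw [e1, e2, e3]
        constructor
        · rw [ih.1]; simp [pvLoopA]
        · simpa using ih.1
      · have htail := pvSplitNL_tail c rest h
        have hhead : (pvSplitNL (c :: rest)).headI = c :: pvTakeLine rest := by
          rw [pvSplitNL_head]; simp [pvTakeLine, h]
        have hcons : pvSplitNL (c :: rest) = (c :: pvTakeLine rest) :: (pvSplitNL rest).tail := by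
          rcases hx : pvSplitNL (c :: rest) with _ | ⟨r, rs⟩
          · exact absurd hx (pvSplitNL_ne_nil _)
          · have h1 := hhead; have h2 := htail
            rw [hx] at h1 h2
            simp only [List.headI] at h1
            simp only [List.tail] at h2
            rw [h1, h2]; rfl
        constructor
        · by_cases hp : c = 'p'
          · subst hp
            rw [hcons]
            simp [pvScanB, pvLoopA, PySem.List.pyGet?, PySem.List.pyIdx?]
          · simp only [pvScanB]
            rw [if_neg (by simp [hp]), decide_eq_false h, hcons]
            simp only [pvLoopA]
            rw [if_pos (by simp), if_neg (by simp [PySem.List.pyGet?, PySem.List.pyIdx?, hp])]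
            exact ih.2
        · simp only [pvScanB]
          rw [if_neg (by simp), decide_eq_false h, htail]
          exact ih.2

-- ===== VERDICT (by name: the statement is the Claim_ definition above) =====
theorem parse_psi_output_spec : Claim_equal_parse_psi_output := by
  intro output _
  unfold Spec_parse_psi_output parse_psi_output parse_psi_output_alt
  rw [pvSplitOn_eq, ← (pvScan_eq output.toList).1]
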